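-- pv_equiv track=rewrite | github.com/zhihao-chen/NLP-experiments | nlp/processors/utils_ee.py | ids2span
-- ===== SOURCE A (Python) =====
-- def ids2span(ids):
--     """
--     parse ids to spans, e.g. [1, 2, 3, 4, 7, 8, 9] -> [1, 5, 7, 10]
--     :param ids: id list
--     :return:
--     """
--     spans = []
--     pre = -10
--     for pos in ids:
--         if pos - 1 != pre:
--             spans.append(pre + 1)
--             spans.append(pos)
--         pre = pos
--     spans.append(pre + 1)
--     spans = spans[1:]
--     return spans
-- ===== SOURCE B (Python) =====
-- def ids2span(ids):
--     # Two-phase: first build the list of maximal consecutive runs as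
--     # [start, end] pairs, then flatten each run to (start, end+1).
--     runs = []
--     for pos in ids:
--         if runs and runs[-1][1] + 1 == pos:
--             runs[-1][1] = pos
--         else:
--             runs.append([pos, pos])
--     out = []
--     for s, e in runs:
--         out.append(s)
--         out.append(e + 1)
--     return out
-- ===== Notes on version B (the rewrite author's own statement) =====
-- stated objective: alternative
-- what changed: B is two-phase: it first builds the list of maximal consecutive runs as [start,end] pairs (extending the last run in place or opening a new one), then flattens each run to (start, end+1); A does a single adjacent-difference pass interleaving boundary appends around a -10 sentinel and slicing off a leading dummy.
-- intended difference: On inputs whose first element is -9, A's sentinel pre=-10 makes the first boundary test 'pos-1 != pre' fail, so A silently drops the first run's start/end pair (e.g. A([-9]) = []), while B returns the full span list ([-9,-8]), which is the intended value since -9 starts a run like any other id. — e.g. on ids2span([-9]): A returns [], B returns [-9, -8]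
import Mathlib
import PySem

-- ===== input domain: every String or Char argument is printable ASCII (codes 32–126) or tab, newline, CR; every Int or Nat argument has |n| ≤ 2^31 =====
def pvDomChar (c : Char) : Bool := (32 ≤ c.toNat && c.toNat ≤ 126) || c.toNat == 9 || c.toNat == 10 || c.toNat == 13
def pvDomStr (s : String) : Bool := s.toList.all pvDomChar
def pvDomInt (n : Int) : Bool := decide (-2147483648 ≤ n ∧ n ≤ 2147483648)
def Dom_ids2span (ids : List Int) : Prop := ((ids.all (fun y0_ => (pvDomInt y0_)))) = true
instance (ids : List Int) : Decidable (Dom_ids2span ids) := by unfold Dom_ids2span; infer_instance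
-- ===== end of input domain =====

-- B rebuilds the spans in two phases (collect maximal consecutive runs, then flatten each
-- run to (start, end+1)) instead of A's single sentinel-based adjacent-difference pass;
-- same cost, different decomposition ("alternative").

-- ===== PORT A =====
def ids2spanStepA (s : List Int × Int) (pos : Int) : List Int × Int :=
  if pos - 1 ≠ s.2 then (s.1 ++ [s.2 + 1, pos], pos) else (s.1, pos)

def ids2span (ids : List Int) : List Int :=
  let st := ids.foldl ids2spanStepA ([], -10)
  PySem.List.slice (st.1 ++ [st.2 + 1]) (some 1) none

-- ===== PORT B =====
def ids2spanStepB (runs : List (Int × Int)) (pos : Int) : List (Int × Int) :=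
  match runs.getLast? with
  | some r => if r.2 + 1 = pos then runs.dropLast ++ [(r.1, pos)] else runs ++ [(pos, pos)]
  | none => [(pos, pos)]

def ids2spanRuns (ids : List Int) : List (Int × Int) :=
  ids.foldl ids2spanStepB []

def ids2span_alt (ids : List Int) : List Int :=
  (ids2spanRuns ids).foldl (fun out r => out ++ [r.1, r.2 + 1]) []

-- ===== PRECONDITION & SPEC =====
-- On inputs whose first element is -9, A's sentinel pre = -10 makes the first boundary test
-- 'pos - 1 != pre' fail, so A silently drops the first run's start/end pair (A([-9]) = []);
-- B returns the full span list ([-9, -8]), the intended value: -9 starts a run like any other id.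
def D_ids2span (ids : List Int) : Prop := ids.head? = some (-9)
instance (ids : List Int) : Decidable (D_ids2span ids) := by unfold D_ids2span; infer_instance

def Spec_ids2span (ids : List Int) (out : List Int) : Prop := ¬ D_ids2span ids → out = ids2span_alt ids
instance (ids : List Int) (out : List Int) : Decidable (Spec_ids2span ids out) := by unfold Spec_ids2span; infer_instance

def pvDiffWitness_ids2span : List Int := [-9]
def pvDiffWitnessOut_ids2span : (List Int) × (List Int) := ([], [-9, -8])

-- ===== CLAIM (what is proved, stated in full; the proofs are below) =====
def Claim_unchanged_ids2span : Prop := ∀ (ids : List Int), Dom_ids2span ids → Spec_ids2span ids (ids2span ids)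
def Claim_changed_ids2span : Prop := Dom_ids2span (pvDiffWitness_ids2span) ∧ D_ids2span (pvDiffWitness_ids2span) ∧ ids2span (pvDiffWitness_ids2span) = pvDiffWitnessOut_ids2span.1 ∧ ids2span_alt (pvDiffWitness_ids2span) = pvDiffWitnessOut_ids2span.2 ∧ pvDiffWitnessOut_ids2span.1 ≠ pvDiffWitnessOut_ids2span.2
def Claim_exact_ids2span : Prop := ∀ (ids : List Int), Dom_ids2span ids → D_ids2span ids → ids2span ids ≠ ids2span_alt ids

-- ===== LEMMAS AND PROOFS =====

-- Flattening of a run list (what B's second loop computes).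
def ids2spanFlat (rs : List (Int × Int)) : List Int := rs.flatMap (fun r => [r.1, r.2 + 1])

lemma ids2spanFlat_acc (rs : List (Int × Int)) (acc : List Int) :
    rs.foldl (fun out r => out ++ [r.1, r.2 + 1]) acc = acc ++ ids2spanFlat rs := by
  induction rs generalizing acc with
  | nil => simp [ids2spanFlat]
  | cons r rs ih => simp [ids2spanFlat, ih, List.flatMap_cons]

lemma ids2span_alt_eq_flat (ids : List Int) :
    ids2span_alt ids = ids2spanFlat (ids2spanRuns ids) := by
  unfold ids2span_alt
  rw [ids2spanFlat_acc]
  simp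

-- Main loop correspondence: if A's state is (-9 :: flat rs ++ [a], b) and B's run list is
-- rs ++ [(a, b)] (b the end of the open run, a its start), the final outputs agree.
lemma ids2span_loop (rest : List Int) (rs : List (Int × Int)) (a b : Int) :
    ((rest.foldl ids2spanStepA (-9 :: ids2spanFlat rs ++ [a], b)).1 ++
      [(rest.foldl ids2spanStepA (-9 :: ids2spanFlat rs ++ [a], b)).2 + 1]).tail
    = ids2spanFlat (rest.foldl ids2spanStepB (rs ++ [(a, b)])) := by
  induction rest generalizing rs a b with
  | nil => simp [ids2spanFlat]
  | cons pos rest ih =>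
    by_cases h : b + 1 = pos
    · have hne : ¬ pos - 1 ≠ b := by omega
      have hA : ids2spanStepA (-9 :: ids2spanFlat rs ++ [a], b) pos
          = (-9 :: ids2spanFlat rs ++ [a], pos) := by
        simp only [ids2spanStepA, hne, ite_false]
      have hB : ids2spanStepB (rs ++ [(a, b)]) pos = rs ++ [(a, pos)] := by
        simp [ids2spanStepB, h]
      rw [List.foldl_cons, List.foldl_cons, hA, hB]
      exact ih rs a pos
    · have hne : pos - 1 ≠ b := by omega
      have hA : ids2spanStepA (-9 :: ids2spanFlat rs ++ [a], b) pos
          = (-9 :: ids2spanFlat (rs ++ [(a, b)]) ++ [pos], pos) := by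
        simp [ids2spanStepA, hne, ids2spanFlat]
      have hB : ids2spanStepB (rs ++ [(a, b)]) pos = (rs ++ [(a, b)]) ++ [(pos, pos)] := by
        simp [ids2spanStepB, h]
      rw [List.foldl_cons, List.foldl_cons, hA, hB]
      exact ih (rs ++ [(a, b)]) pos pos

-- A's fold only ever appends to the spans component, so the accumulator factors out.
lemma ids2span_acc_factor (rest : List Int) (sp : List Int) (b : Int) :
    rest.foldl ids2spanStepA (sp, b)
    = (sp ++ (rest.foldl ids2spanStepA ([], b)).1, (rest.foldl ids2spanStepA ([], b)).2) := by
  induction rest generalizing sp b with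
  | nil => simp
  | cons pos rest ih =>
    simp only [List.foldl_cons, ids2spanStepA, List.nil_append]
    by_cases h : pos - 1 = b
    · simp only [h, ne_eq, not_true_eq_false, ite_false]
      exact ih sp pos
    · simp only [ne_eq, h, not_false_eq_true, ite_true]
      rw [ih (sp ++ [b + 1, pos]) pos, ih ([b + 1, pos]) pos]
      simp

theorem ids2span_spec_aux : ∀ (ids : List Int), ¬ D_ids2span ids → ids2span ids = ids2span_alt ids := by
  intro ids hD
  match ids with
  | [] => decide
  | p :: rest =>
    have hp : p ≠ -9 := by
      simpa [D_ids2span] using hD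
    have hA1 : ids2spanStepA ([], -10) p = ([-9, p], p) := by
      simp [ids2spanStepA]; omega
    have hB1 : ids2spanStepB [] p = [(p, p)] := by
      simp [ids2spanStepB]
    have := ids2span_loop rest [] p p
    simp only [ids2spanFlat, List.flatMap_nil, List.nil_append] at this
    simp only [ids2span, ids2span_alt_eq_flat, ids2spanRuns, List.foldl_cons, hA1, hB1,
      PySem.List.slice_from_one]
    simpa using this

-- ===== VERDICT (by name: the statement is the Claim_ definition above) =====
theorem ids2span_spec : Claim_unchanged_ids2span := by
  intro ids _ hD
  exact ids2span_spec_aux ids hD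

theorem ids2span_changed : Claim_changed_ids2span := by
  unfold Claim_changed_ids2span; decide

theorem ids2span_tight : Claim_exact_ids2span := by
  intro ids _ hD
  match ids with
  | p :: rest =>
    have hp : p = -9 := by simpa [D_ids2span] using hD
    subst hp
    -- A's first step does not open the run: state stays ([], -9); in the good run it would be
    -- ([-9, -9], -9). Compare lengths: A's output is two elements shorter than B's.
    have hA1 : ids2spanStepA ([], -10) (-9) = ([], -9) := by
      simp [ids2spanStepA]
    have hB1 : ids2spanStepB [] (-9) = [(-9, -9)] := by
      simp [ids2spanStepB]
    have hloop := ids2span_loop rest [] (-9) (-9)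
    rw [show (-9 : Int) :: ids2spanFlat [] ++ [-9] = [-9, -9] from rfl,
      List.nil_append] at hloop
    have hfac := ids2span_acc_factor rest [-9, -9] (-9)
    -- length of B's output
    have hlenB : (ids2span_alt ((-9) :: rest)).length
        = (rest.foldl ids2spanStepA ([], -9)).1.length + 2 := by
      rw [ids2span_alt_eq_flat]
      simp only [ids2spanRuns, List.foldl_cons, hB1]
      rw [← hloop, hfac]
      simp
    have hlenA : (ids2span ((-9) :: rest)).length
        = (rest.foldl ids2spanStepA ([], -9)).1.length := by
      simp only [ids2span, List.foldl_cons, hA1, PySem.List.slice_from_one]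
      simp [List.length_tail]
    intro hEq
    have := congrArg List.length hEq
    omega
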